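-- pv_equiv track=rewrite | github.com/collinsakenga/codewars_solutions | 6 kyu/6 kyu_Yes No Yes No.py | yes_no
-- ===== SOURCE A (Python) =====
-- def yes_no(arr):
--     res = []
--     flag = 0
--     count = 0
--     while arr:
--         for i in range(count, len(arr), 2):
--             res.append(arr[i])
--             count += 1
--         temp = arr.copy()
--         for i in range(count-flag):
--             arr.pop(i+flag)
--         count = 0 if res[-1] != temp[-1] else 1
--         if count == 1:
--             flag = 1
--         else:
--             flag = 0
--     return res
-- ===== SOURCE B (Python) =====
-- def yes_no(arr):
--     # Rotating-queue deal: pop the front card; alternately keep it or send it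
--     # to the back of the deck.  (Does not mutate arr, unlike A which empties it.)
--     deck = list(arr)
--     res = []
--     keep = True
--     while deck:
--         card = deck.pop(0)
--         if keep:
--             res.append(card)
--         else:
--             deck.append(card)
--         keep = not keep
--     return res
-- ===== Notes on version B (the rewrite author's own statement) =====
-- stated objective: simpler
-- what changed: Replaces A's repeated every-other passes (in-place index pops, a snapshot copy and a value-based last-element parity test) by a single rotating-queue walk: pop the front card and alternately keep it or send it to the back; B also leaves arr unmutated where A empties it in place.
-- outside the precondition, e.g. on yes_no([0, 0, 1, 1]): A returns [0, 1, 1, 0], B returns [0, 1, 0, 1]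
import Mathlib
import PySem

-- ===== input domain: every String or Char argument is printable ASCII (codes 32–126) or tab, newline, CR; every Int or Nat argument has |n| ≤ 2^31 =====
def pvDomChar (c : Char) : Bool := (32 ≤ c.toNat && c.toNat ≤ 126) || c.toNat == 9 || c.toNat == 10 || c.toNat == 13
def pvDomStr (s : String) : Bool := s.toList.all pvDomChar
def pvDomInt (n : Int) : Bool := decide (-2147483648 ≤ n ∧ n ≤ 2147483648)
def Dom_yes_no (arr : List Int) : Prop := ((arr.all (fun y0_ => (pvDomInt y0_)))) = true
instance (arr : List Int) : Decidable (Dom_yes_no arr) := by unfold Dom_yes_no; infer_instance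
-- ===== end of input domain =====

-- B replaces A's repeated every-other passes (in-place pops, a snapshot copy and a
-- value-based parity test) by a single rotating-queue walk (simpler); A empties its
-- argument in place, B does not mutate it — the equivalence is about the return value.


-- ===== PORT A =====
-- Fuel-guarded transliteration of A's `while arr:` loop (the fuel only makes the same
-- computation total; on every input admitted by Pre_ it is never exhausted).
def yes_no_loop : Nat → List Int → List Int → Int → Int → List Int
  | 0, _, res, _, _ => res
  | fuel+1, arr, res, count, flag =>
    if arr = [] then res
    else
      -- for i in range(count, len(arr), 2): res.append(arr[i]); count += 1
      let rc := (PySem.List.pyRange count (arr.length : Int) 2).foldl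
        (fun (p : List Int × Int) i => (p.1 ++ [PySem.List.pyGetD arr i 0], p.2 + 1)) (res, count)
      -- temp = arr.copy()
      let temp := arr
      -- for i in range(count - flag): arr.pop(i + flag)
      let arr2 := (PySem.List.pyRange 0 (rc.2 - flag) 1).foldl
        (fun a i => ((PySem.List.pop? a (i + flag)).map Prod.snd).getD a) arr
      -- count = 0 if res[-1] != temp[-1] else 1 ; flag = 1 if count == 1 else 0
      let count2 : Int := if PySem.List.pyGetD rc.1 (-1) 0 ≠ PySem.List.pyGetD temp (-1) 0 then 0 else 1
      let flag2 : Int := if count2 = 1 then 1 else 0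
      yes_no_loop fuel arr2 rc.1 count2 flag2

def yes_no (arr : List Int) : List Int :=
  yes_no_loop (2 * arr.length + 2) arr [] 0 0

-- ===== PORT B =====
-- while deck: card = deck.pop(0); keep → res.append(card) / else deck.append(card); toggle
def yes_no_run (deck res : List Int) (keep : Bool) : List Int :=
  match deck with
  | [] => res
  | card :: rest =>
    if keep then yes_no_run rest (res ++ [card]) (!keep)
    else yes_no_run (rest ++ [card]) res (!keep)
termination_by 2 * deck.length + (if keep then 0 else 1)
decreasing_by all_goals simp_all [List.length_append] <;> omega

def yes_no_alt (arr : List Int) : List Int := yes_no_run arr [] true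

-- ===== PRECONDITION & SPEC =====
-- Pre_ excludes lists with duplicate values: A decides each pass's parity by comparing the
-- last dealt VALUE with the last element's VALUE (`res[-1] != temp[-1]`), which misfires when
-- values repeat — A diverges on some such lists and returns an accidental order on others.
def Pre_yes_no (arr : List Int) : Prop := arr.Nodup
instance (arr : List Int) : Decidable (Pre_yes_no arr) := by unfold Pre_yes_no; infer_instance
def pvWitness_yes_no : List Int := [3, 1, 4, 2]
def Spec_yes_no (arr : List Int) (out : List Int) : Prop := out = yes_no_alt arr
instance (arr : List Int) (out : List Int) : Decidable (Spec_yes_no arr out) := by unfold Spec_yes_no; infer_instance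

-- ===== CLAIM (what is proved, stated in full; the proofs are below) =====
def Claim_equal_yes_no : Prop := ∀ (arr : List Int), Dom_yes_no arr → Pre_yes_no arr → Spec_yes_no arr (yes_no arr)

-- ===== LEMMAS AND PROOFS =====

-- `altL true l` = elements of l at even positions, `altL false l` = odd positions
def altL (b : Bool) : List Int → List Int
  | [] => []
  | x :: xs => if b then x :: altL (!b) xs else altL (!b) xs

theorem altL_length (l : List Int) :
    (altL true l).length = (l.length + 1) / 2 ∧ (altL false l).length = l.length / 2 := by
  induction l with
  | nil => simp [altL]
  | cons x t ih => simp [altL]; omega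

-- the common pass-structured specification both ports are reduced to
def deal (l : List Int) (b : Bool) : List Int :=
  if h : l = [] then []
  else altL b l ++ deal (altL (!b) l) (xor b (decide (l.length % 2 = 1)))
termination_by 2 * l.length + (if b then 0 else 1)
decreasing_by
  have h1 := altL_length l
  have h2 : 0 < l.length := List.length_pos_iff.mpr h
  cases b <;> simp only [Bool.not_true, Bool.not_false] <;> split_ifs <;> simp_all <;> omega

theorem deal_ne (l : List Int) (b : Bool) (h : l ≠ []) :
    deal l b = altL b l ++ deal (altL (!b) l) (xor b (decide (l.length % 2 = 1))) := by
  rw [deal]; simp [h]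

theorem deal_nil (b : Bool) : deal [] b = [] := by rw [deal]; rfl

theorem altL_perm (l : List Int) : ∀ b, (altL b l ++ altL (!b) l).Perm l := by
  induction l with
  | nil => intro b; simp [altL]
  | cons x t ih =>
    intro b
    cases b
    · simpa [altL] using ((List.perm_middle).trans ((ih true).cons x))
    · simpa [altL] using ((ih false).cons x)

theorem altL_true_ne_nil {l : List Int} (h : l ≠ []) : altL true l ≠ [] := by
  cases l with
  | nil => exact absurd rfl h
  | cons x t => simp [altL]

theorem getLast?_cons_of_ne_nil (y : Int) (s : List Int) (h : s ≠ []) :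
    (y :: s).getLast? = s.getLast? := by
  obtain ⟨z, s', rfl⟩ := List.exists_cons_of_ne_nil h
  rfl

-- when the pass's parity says the last element is taken, the last taken value IS the last value
theorem altL_last : ∀ (l : List Int) (b : Bool), l ≠ [] →
    (if b then l.length % 2 = 1 else l.length % 2 = 0) →
    (altL b l).getLast? = l.getLast?
  | [], _, h, _ => absurd rfl h
  | [x], true, _, _ => by simp [altL]
  | [x], false, _, hp => by simp at hp
  | x :: y :: u, b, _, hp => by
    cases b with
    | false =>
      by_cases h0 : u = []
      · subst h0; simp [altL]
      · have hp' : u.length % 2 = 0 := by simp at hp; omega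
        have ih := altL_last u false h0 (by simpa using hp')
        have hlen := (altL_length u).2
        have hne : altL false u ≠ [] := by
          intro hh
          have : (altL false u).length = 0 := by rw [hh]; rfl
          have hu0 : u.length ≠ 0 := by simpa [List.length_eq_zero_iff] using h0
          omega
        have e1 : altL false (x :: y :: u) = y :: altL false u := by simp [altL]
        rw [e1, getLast?_cons_of_ne_nil y _ hne, ih,
            getLast?_cons_of_ne_nil x _ (by simp),
            getLast?_cons_of_ne_nil y _ h0]
    | true =>
      have hp' : u.length % 2 = 1 := by simp at hp; omega
      have h0 : u ≠ [] := by intro hh; subst hh; simp at hp'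
      have ih := altL_last u true h0 (by simpa using hp')
      have hlen := (altL_length u).1
      have hne : altL true u ≠ [] := altL_true_ne_nil h0
      have e1 : altL true (x :: y :: u) = x :: altL true u := by simp [altL]
      rw [e1, getLast?_cons_of_ne_nil x _ hne, ih,
          getLast?_cons_of_ne_nil x _ (by simp),
          getLast?_cons_of_ne_nil y _ h0]

-- ---- inner1: the take loop ----
theorem pyRange_two_cons (a b : Int) (h : a < b) :
    PySem.List.pyRange a b 2 = a :: PySem.List.pyRange (a + 2) b 2 := by
  rw [PySem.List.pyRange_of_pos a b (by norm_num), PySem.List.pyRange_of_pos (a+2) b (by norm_num)]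
  have hn : ((b - a + 2 - 1) / 2).toNat
      = (if a + 2 < b then ((b - (a+2) + 2 - 1) / 2).toNat else 0) + 1 := by
    split_ifs with h2 <;> omega
  rw [if_pos h, hn, List.range_succ_eq_map]
  simp only [List.map_cons, List.map_map, Nat.cast_zero, mul_zero, add_zero]
  congr 1
  apply List.map_congr_left
  intro k _
  simp only [Function.comp_apply]
  push_cast
  ring

theorem range2_shift (x : Int) (t : List Int) (a c : Int) (ha : 1 ≤ a) :
    (PySem.List.pyRange a c 2).map (fun i => PySem.List.pyGetD (x :: t) i 0)
    = (PySem.List.pyRange (a - 1) (c - 1) 2).map (fun i => PySem.List.pyGetD t i 0) := by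
  rw [PySem.List.pyRange_of_pos a c (by norm_num),
      PySem.List.pyRange_of_pos (a-1) (c-1) (by norm_num)]
  have hif : (if a < c then ((c - a + 2 - 1) / 2).toNat else 0)
      = (if a - 1 < c - 1 then ((c - 1 - (a - 1) + 2 - 1) / 2).toNat else 0) := by
    split_ifs <;> omega
  rw [hif]
  simp only [List.map_map]
  apply List.map_congr_left
  intro k _
  simp only [Function.comp_apply]
  have e2 : a + 2 * (k : Int) = (((a - 1 + 2 * k).toNat + 1 : Nat) : Int) := by
    push_cast; omega
  have e3 : a - 1 + 2 * (k : Int) = (((a - 1 + 2 * k).toNat : Nat) : Int) := by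
    push_cast; omega
  rw [e2, e3, PySem.List.pyGetD_natCast, PySem.List.pyGetD_natCast, List.getD_cons_succ]
  rw [Int.toNat_natCast]

theorem range2_map (l : List Int) : ∀ (b : Bool),
    (PySem.List.pyRange (if b then 0 else 1) (l.length : Int) 2).map
      (fun i => PySem.List.pyGetD l i 0) = altL b l := by
  induction l with
  | nil =>
    intro b
    cases b <;>
      simp [PySem.List.pyRange_of_pos (s := 2) _ _ (by norm_num : (0:Int) < 2), altL]
  | cons x t ih =>
    intro b
    cases b
    · rw [if_neg (by simp), range2_shift x t 1 _ le_rfl]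
      have e0 : (1 : Int) - 1 = 0 := by norm_num
      have e1 : ((x :: t).length : Int) - 1 = (t.length : Int) := by simp
      rw [e0, e1]
      have h1 := ih true
      rw [if_pos rfl] at h1
      rw [h1]
      simp [altL]
    · rw [if_pos rfl]
      have hlt : (0:Int) < ((x :: t).length : Int) := by exact_mod_cast t.length.succ_pos
      rw [pyRange_two_cons 0 _ hlt]
      simp only [List.map_cons, PySem.List.pyGetD_zero_cons]
      cases t with
      | nil =>
        rw [PySem.List.pyRange_of_pos (0+2) _ (by norm_num)]
        simp [altL]
      | cons y u =>
        rw [show (0:Int) + 2 = 2 from by norm_num,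
            range2_shift x (y :: u) 2 _ (by norm_num)]
        have e0 : (2 : Int) - 1 = 1 := by norm_num
        have e1 : ((x :: y :: u).length : Int) - 1 = ((y :: u).length : Int) := by
          simp
        rw [e0, e1]
        have h1 := ih false
        rw [if_neg (by simp)] at h1
        rw [h1]
        simp [altL]

theorem take_fold (l res : List Int) (b : Bool) :
    (PySem.List.pyRange (if b then 0 else 1) (l.length : Int) 2).foldl
      (fun (p : List Int × Int) i => (p.1 ++ [PySem.List.pyGetD l i 0], p.2 + 1))
      (res, (if b then (0:Int) else 1))
    = (res ++ altL b l, (if b then (0:Int) else 1) + ((altL b l).length : Int)) := by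
  rw [PySem.List.foldl_prod_mk
        (f := fun (a : List Int) (i : Int) => a ++ [PySem.List.pyGetD l i 0])
        (g := fun (c : Int) (_ : Int) => c + 1)]
  have h1 : (PySem.List.pyRange (if b then (0:Int) else 1) (l.length : Int) 2).foldl
      (fun (a : List Int) (i : Int) => a ++ [PySem.List.pyGetD l i 0]) res
      = res ++ altL b l := by
    rw [PySem.List.foldl_append_singleton_eq_map, range2_map]
  have h2 : (PySem.List.pyRange (if b then (0:Int) else 1) (l.length : Int) 2).length
      = (altL b l).length := by
    rw [← range2_map l b, List.length_map]
  have h3 : (PySem.List.pyRange (if b then (0:Int) else 1) (l.length : Int) 2).foldl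
      (fun (c : Int) (_ : Int) => c + 1) (if b then (0:Int) else 1)
      = (if b then (0:Int) else 1) + ((altL b l).length : Int) := by
    rw [PySem.List.foldl_add _ (fun _ => (1:Int)), PySem.List.sum_map_const_int, h2]
    ring
  rw [h1, h3]

-- ---- inner2: the pop loop ----
def popSeq (m : List Int) (j : Nat) : Nat → List Int
  | 0 => m
  | k+1 => popSeq (m.eraseIdx j) (j+1) k

theorem pop_step (a : List Int) (i : Int) (hi : 0 ≤ i) :
    ((PySem.List.pop? a i).map Prod.snd).getD a = a.eraseIdx i.toNat := by
  by_cases h : i < (a.length : Int)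
  · have hn : i.toNat < a.length := by omega
    rw [show i = ((i.toNat : Nat) : Int) by omega, PySem.List.pop?_natCast a i.toNat hn]
    simp
    congr 1
    omega
  · have hnone : PySem.List.pyIdx? a.length i = none := by
      simp only [PySem.List.pyIdx?, if_pos hi]
      rw [if_neg h]
    simp [PySem.List.pop?, hnone, List.eraseIdx_of_length_le (by omega : a.length ≤ i.toNat)]

theorem fold_popSeq (k : Nat) : ∀ (m : List Int) (c flag : Int), 0 ≤ c → 0 ≤ flag →
    (PySem.List.pyRange c (c + k) 1).foldl
      (fun a i => ((PySem.List.pop? a (i + flag)).map Prod.snd).getD a) m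
    = popSeq m (c + flag).toNat k := by
  induction k with
  | zero => intro m c flag _ _; rw [show c + ((0:Nat):Int) = c by simp, PySem.List.pyRange_one_eq_nil le_rfl]; rfl
  | succ k ih =>
    intro m c flag hc hf
    rw [PySem.List.pyRange_one_cons (by omega : c < c + ((k+1 : Nat) : Int))]
    rw [List.foldl_cons]
    rw [pop_step m (c + flag) (by omega)]
    have e1 : c + ((k+1 : Nat) : Int) = (c + 1) + ((k : Nat) : Int) := by push_cast; ring
    rw [e1, ih (m.eraseIdx (c + flag).toNat) (c + 1) flag (by omega) hf]
    have e2 : (c + 1 + flag).toNat = (c + flag).toNat + 1 := by omega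
    rw [e2]
    rfl

theorem popSeq_cons (k : Nat) : ∀ (x : Int) (m : List Int) (j : Nat),
    popSeq (x :: m) (j+1) k = x :: popSeq m j k := by
  induction k with
  | zero => intro x m j; rfl
  | succ k ih =>
    intro x m j
    show popSeq ((x :: m).eraseIdx (j+1)) (j+2) k = x :: popSeq (m.eraseIdx j) (j+1) k
    rw [List.eraseIdx_cons_succ, ih]

theorem popSeq_true : ∀ (l : List Int), popSeq l 0 (altL true l).length = altL false l
  | [] => rfl
  | [x] => rfl
  | x :: y :: t => by
    have e1 : (altL true (x :: y :: t)).length = (altL true t).length + 1 := by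
      simp [altL]
    rw [e1]
    show popSeq ((x :: y :: t).eraseIdx 0) 1 (altL true t).length = altL false (x :: y :: t)
    rw [List.eraseIdx_cons_zero]
    rw [show (1:Nat) = 0 + 1 from rfl, popSeq_cons, popSeq_true t]
    simp [altL]

theorem popSeq_spec (l : List Int) (b : Bool) :
    popSeq l (if b then 0 else 1) (altL b l).length = altL (!b) l := by
  cases b
  · cases l with
    | nil => rfl
    | cons x t =>
      have e1 : altL false (x :: t) = altL true t := by simp [altL]
      rw [if_neg (by simp), e1, show (1:Nat) = 0 + 1 from rfl, popSeq_cons, popSeq_true t]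
      simp [altL]
  · rw [if_pos rfl, popSeq_true l]; rfl

-- ---- the value-based parity test, under Nodup ----
theorem pyGetD_neg_one_eq (xs : List Int) : PySem.List.pyGetD xs (-1) 0 = xs.getLast?.getD 0 := by
  cases hx : xs with
  | nil => rfl
  | cons a t =>
    rw [PySem.List.pyGetD_neg_one _ 0 (by simp), List.getLast?_eq_some_getLast (by simp)]
    rfl

theorem test_eq (l res : List Int) (b : Bool) (hne : l ≠ []) (hnd : (res ++ l).Nodup)
    (hres : res = [] → b = true) :
    ((if PySem.List.pyGetD (res ++ altL b l) (-1) 0 ≠ PySem.List.pyGetD l (-1) 0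
        then (0:Int) else 1))
    = (if xor b (decide (l.length % 2 = 1)) then 0 else 1) := by
  rw [pyGetD_neg_one_eq, pyGetD_neg_one_eq, List.getLast?_append]
  obtain ⟨v, hv⟩ := Option.isSome_iff_exists.mp (List.getLast?_isSome.mpr hne)
  have hvmem : v ∈ l := List.mem_of_getLast? hv
  have hndl : l.Nodup := hnd.of_append_right
  have hndalt : (altL b l ++ altL (!b) l).Nodup :=
    ((altL_perm l b).nodup_iff).mpr hndl
  have hpair : ∀ a ∈ altL b l, ∀ c ∈ altL (!b) l, a ≠ c :=
    (List.nodup_append.mp hndalt).2.2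
  have hnottaken : (if b then l.length % 2 = 0 else l.length % 2 = 1) →
      ((altL b l).getLast?.or res.getLast?).getD 0 ≠ v := by
    intro hpar
    have ht := altL_last l (!b) hne (by cases b <;> simpa using hpar)
    have hvin : v ∈ altL (!b) l := List.mem_of_getLast? (ht.trans hv)
    have hvnot : v ∉ altL b l := fun hmem => (hpair v hmem v hvin) rfl
    cases halt : altL b l with
    | nil =>
      have hrne : res ≠ [] := by
        intro hr
        exact altL_true_ne_nil hne (by rw [← hres hr]; exact halt)
      obtain ⟨w, hw⟩ := Option.isSome_iff_exists.mp (List.getLast?_isSome.mpr hrne)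
      have hwmem : w ∈ res := List.mem_of_getLast? hw
      have hwv : w ≠ v := (List.nodup_append.mp hnd).2.2 w hwmem v hvmem
      rw [hw]
      simpa using hwv
    | cons a t =>
      obtain ⟨w, hw⟩ := Option.isSome_iff_exists.mp
        (List.getLast?_isSome.mpr (by simp : (a :: t) ≠ ([] : List Int)))
      have hwmem : w ∈ altL b l := by rw [halt]; exact List.mem_of_getLast? hw
      have hwv : w ≠ v := fun hh => hvnot (hh ▸ hwmem)
      rw [hw]
      simpa using hwv
  rcases Nat.mod_two_eq_zero_or_one l.length with hm | hm
  · cases b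
    · -- b = false, even length: last element is taken
      have ht := altL_last l false hne (by simp [hm])
      rw [ht, hv]
      simp [hm]
    · -- b = true, even length: last element is NOT taken
      have hne' := hnottaken (by simp [hm])
      rw [hv]
      simp only [Option.getD_some]
      rw [if_pos hne']
      simp [hm]
  · cases b
    · -- b = false, odd length: last element is NOT taken
      have hne' := hnottaken (by simp [hm])
      rw [hv]
      simp only [Option.getD_some]
      rw [if_pos hne']
      simp [hm]
    · -- b = true, odd length: last element is taken
      have ht := altL_last l true hne (by simp [hm])
      rw [ht, hv]
      simp [hm]

-- ---- main inductions ----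
theorem measure_lt (l : List Int) (b : Bool) (h : l ≠ []) :
    2 * (altL (!b) l).length + (if xor b (decide (l.length % 2 = 1)) then 0 else 1)
      < 2 * l.length + (if b then 0 else 1) := by
  have h1 := altL_length l
  have h2 : 0 < l.length := List.length_pos_iff.mpr h
  cases b <;> simp only [Bool.not_true, Bool.not_false] <;> split_ifs <;> simp_all <;> try omega

theorem aloop_deal : ∀ (fuel : Nat) (l res : List Int) (b : Bool),
    (res ++ l).Nodup → (res = [] → b = true) →
    2 * l.length + (if b then 0 else 1) < fuel →
    yes_no_loop fuel l res (if b then 0 else 1) (if b then 0 else 1) = res ++ deal l b := by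
  intro fuel
  induction fuel with
  | zero => intro l res b _ _ h; omega
  | succ fuel ih =>
    intro l res b hnd hres h
    by_cases hl : l = []
    · subst hl
      rw [yes_no_loop, if_pos rfl, deal_nil, List.append_nil]
    · rw [yes_no_loop, if_neg hl]
      dsimp only
      rw [take_fold l res b]
      dsimp only
      have e1 : (if b then (0:Int) else 1) + ((altL b l).length : Int)
          - (if b then (0:Int) else 1) = 0 + ((altL b l).length : Int) := by ring
      rw [e1, fold_popSeq (altL b l).length l 0 (if b then 0 else 1) le_rfl
            (by cases b <;> norm_num)]
      have e2 : ((0:Int) + (if b then (0:Int) else 1)).toNat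
          = (if b then (0:Nat) else 1) := by cases b <;> norm_num
      rw [e2, popSeq_spec l b, test_eq l res b hl hnd hres]
      have hnd' : ((res ++ altL b l) ++ altL (!b) l).Nodup := by
        rw [List.append_assoc]
        exact (List.Perm.nodup_iff (List.Perm.append_left res (altL_perm l b))).mpr hnd
      have hrne : res ++ altL b l ≠ [] := by
        intro hh
        rcases List.append_eq_nil_iff.mp hh with ⟨hr, ha⟩
        exact altL_true_ne_nil hl (by rw [← hres hr]; exact ha)
      have hml := measure_lt l b hl
      cases hb' : xor b (decide (l.length % 2 = 1))
      · -- next pass starts with b' = false (count = 1, flag = 1)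
        rw [hb'] at hml
        have ihh := ih (altL (!b) l) (res ++ altL b l) false hnd'
          (fun hh => absurd hh hrne) (by omega)
        norm_num at ihh ⊢
        rw [ihh, deal_ne l b hl, hb']
      · -- next pass starts with b' = true (count = 0, flag = 0)
        rw [hb'] at hml
        have ihh := ih (altL (!b) l) (res ++ altL b l) true hnd'
          (fun _ => rfl) (by omega)
        norm_num at ihh ⊢
        rw [ihh, deal_ne l b hl, hb']

theorem run_cons_true (x : Int) (rest res : List Int) :
    yes_no_run (x :: rest) res true = yes_no_run rest (res ++ [x]) false := by
  rw [yes_no_run]; simp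

theorem run_cons_false (x : Int) (rest res : List Int) :
    yes_no_run (x :: rest) res false = yes_no_run (rest ++ [x]) res true := by
  rw [yes_no_run]; simp

theorem run_split : ∀ (l s res : List Int) (b : Bool),
    yes_no_run (l ++ s) res b
    = yes_no_run (s ++ altL (!b) l) (res ++ altL b l) (xor b (decide (l.length % 2 = 1))) := by
  intro l
  induction l with
  | nil => intro s res b; simp [altL]
  | cons x t ih =>
    intro s res b
    cases b
    · rw [List.cons_append, run_cons_false, List.append_assoc,
          ih (s ++ [x]) res true]
      have e1 : altL true (x :: t) = x :: altL false t := by simp [altL]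
      have e2 : altL false (x :: t) = altL true t := by simp [altL]
      simp only [Bool.not_true, Bool.not_false, e1, e2, Bool.true_xor, Bool.false_xor,
        List.length_cons, List.append_assoc, List.singleton_append]
      congr 1
      rcases Nat.mod_two_eq_zero_or_one t.length with h | h <;> simp [Nat.add_mod, h]
    · rw [List.cons_append, run_cons_true, ih s (res ++ [x]) false]
      have e1 : altL true (x :: t) = x :: altL false t := by simp [altL]
      have e2 : altL false (x :: t) = altL true t := by simp [altL]
      simp only [Bool.not_true, Bool.not_false, e1, e2, Bool.true_xor, Bool.false_xor,
        List.length_cons, List.append_assoc, List.singleton_append]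
      congr 1
      rcases Nat.mod_two_eq_zero_or_one t.length with h | h <;> simp [Nat.add_mod, h]

theorem run_deal : ∀ (n : Nat) (l : List Int) (b : Bool) (res : List Int),
    2 * l.length + (if b then 0 else 1) ≤ n →
    yes_no_run l res b = res ++ deal l b := by
  intro n
  induction n with
  | zero =>
    intro l b res h
    have hl : l = [] := by
      cases l with
      | nil => rfl
      | cons x t => exfalso; cases b <;> simp at h
    subst hl
    rw [deal_nil, yes_no_run]
    simp
  | succ n ih =>
    intro l b res h
    by_cases hl : l = []
    · subst hl; rw [deal_nil, yes_no_run]; simp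
    · have h1 := run_split l [] res b
      rw [List.append_nil, List.nil_append] at h1
      rw [h1, ih (altL (!b) l) _ (res ++ altL b l)
            (by have := measure_lt l b hl; omega),
          deal_ne l b hl, List.append_assoc]

-- ===== VERDICT (by name: the statement is the Claim_ definition above) =====
theorem yes_no_spec : Claim_equal_yes_no := by
  intro arr _ hpre
  unfold Spec_yes_no yes_no yes_no_alt
  have hA := aloop_deal (2 * arr.length + 2) arr [] true (by simpa using hpre)
      (fun _ => rfl) (by simp)
  have hB := run_deal (2 * arr.length) arr true [] (by simp)
  simpa using hA.trans hB.symm
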